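-- pv_equiv track=rewrite | github.com/williamT386/MathSort | Main.py | get_num_combinations
-- ===== SOURCE A (Python) =====
-- def get_num_combinations(lst, swap_times, original_lst):
--     if swap_times == 0:
--         return 1 if lst == original_lst else 0
--
--     total = 0
--     for i in range(len(lst)):
--         for j in range(i + 1, len(lst)):
--             new_lst = lst[:]
--             new_lst[i], new_lst[j] = new_lst[j], new_lst[i]
--             total += get_num_combinations(new_lst, swap_times - 1, original_lst)
--     return total
-- ===== SOURCE B (Python) =====
-- def get_num_combinations(lst, swap_times, original_lst):
--     # Forward DP: distribution over reachable lists after t swaps, instead of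
--     # exploring every swap sequence recursively.
--     dist = {tuple(lst): 1}
--     for _ in range(swap_times):
--         nxt = {}
--         for state, cnt in dist.items():
--             n = len(state)
--             for i in range(n):
--                 for j in range(i + 1, n):
--                     m = list(state)
--                     m[i], m[j] = m[j], m[i]
--                     key = tuple(m)
--                     nxt[key] = nxt.get(key, 0) + cnt
--         dist = nxt
--     return dist.get(tuple(original_lst), 0)
-- ===== Notes on version B (the rewrite author's own statement) =====
-- stated objective: alternative
-- what changed: Replaces the exhaustive recursion over all swap sequences by a forward dynamic program that keeps one counter per list reachable after each step and looks up the target at the end.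
-- outside the precondition, e.g. on get_num_combinations([5], -1, [5]): A returns 0, B returns 1; on get_num_combinations([1, 2], 950, [1, 2]): A returns 1, B returns 1
import Mathlib
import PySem

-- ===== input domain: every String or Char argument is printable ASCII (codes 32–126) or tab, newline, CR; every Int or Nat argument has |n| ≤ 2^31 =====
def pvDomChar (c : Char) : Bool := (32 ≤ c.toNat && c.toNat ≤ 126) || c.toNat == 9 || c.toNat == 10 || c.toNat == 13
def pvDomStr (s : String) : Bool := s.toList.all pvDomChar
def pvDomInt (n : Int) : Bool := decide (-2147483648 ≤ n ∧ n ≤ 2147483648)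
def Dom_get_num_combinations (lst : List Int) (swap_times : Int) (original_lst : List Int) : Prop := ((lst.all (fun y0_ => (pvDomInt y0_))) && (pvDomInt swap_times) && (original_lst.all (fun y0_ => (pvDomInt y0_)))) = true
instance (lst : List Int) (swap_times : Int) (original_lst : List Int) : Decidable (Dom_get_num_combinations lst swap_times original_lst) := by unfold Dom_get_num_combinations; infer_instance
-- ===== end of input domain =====

-- B replaces A's exhaustive recursion over all swap sequences by a step-by-step
-- counter dictionary over reachable lists (objective: alternative).

-- ===== PORT A =====
-- new_lst = lst[:]; new_lst[i], new_lst[j] = new_lst[j], new_lst[i]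
-- (i, j are always in range by construction, so getD's default is never used)
def pySwap (xs : List Int) (i j : Nat) : List Int :=
  (xs.set i (xs.getD j 0)).set j (xs.getD i 0)

-- A's recursion; Python recurses on swap_times, which is ≥ 0 on Pre_, so the
-- fuel is swap_times.toNat (see get_num_combinations below).
def gncA : List Int → Nat → List Int → Int
  | lst, 0, orig => if lst = orig then 1 else 0
  | lst, Nat.succ k, orig =>
      (List.range lst.length).foldl
        (fun total i =>
          ((List.range lst.length).drop (i+1)).foldl
            (fun total j => total + gncA (pySwap lst i j) k orig)
            total)
        0

def get_num_combinations (lst : List Int) (swap_times : Int) (original_lst : List Int) : Int :=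
  gncA lst swap_times.toNat original_lst

-- ===== PORT B =====
-- one DP step: nxt[key] = nxt.get(key, 0) + cnt over all states and pairs
def gncStep (d : PySem.Dict (List Int) Int) : PySem.Dict (List Int) Int :=
  d.items.foldl
    (fun nxt p =>
      (List.range p.1.length).foldl
        (fun nxt i =>
          ((List.range p.1.length).drop (i+1)).foldl
            (fun nxt j => nxt.insert (pySwap p.1 i j) (nxt.getD (pySwap p.1 i j) 0 + p.2))
            nxt)
        nxt)
    PySem.Dict.empty

def get_num_combinations_alt (lst : List Int) (swap_times : Int) (original_lst : List Int) : Int :=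
  ((PySem.List.pyRange 0 swap_times 1).foldl (fun d _ => gncStep d)
    (PySem.Dict.empty.insert lst 1)).getD original_lst 0

-- ===== PRECONDITION & SPEC =====
-- Pre_ excludes (a) negative swap_times (outside the natural domain), on which
-- A recurses without bound whenever the list has ≥ 2 elements and on an equal
-- list of < 2 elements returns 0 from an empty loop, a corner where B's
-- empty-loop value 1 (no swaps needed) is as defensible, and (b) swap_times at
-- or conservatively near Python's recursion limit (≥ 900) with ≥ 2 elements,
-- where A's depth-first recursion raises RecursionError; the < 2-element
-- unequal-list corner with negative swap_times (both return 0) stays inside.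
def Pre_get_num_combinations (lst : List Int) (swap_times : Int) (original_lst : List Int) : Prop :=
  (0 ≤ swap_times ∧ (swap_times < 900 ∨ lst.length < 2)) ∨
    (lst.length < 2 ∧ lst ≠ original_lst)
instance (lst : List Int) (swap_times : Int) (original_lst : List Int) : Decidable (Pre_get_num_combinations lst swap_times original_lst) := by unfold Pre_get_num_combinations; infer_instance

def pvWitness_get_num_combinations : List Int × Int × List Int := ([1, 2, 3], 2, [2, 1, 3])

def Spec_get_num_combinations (lst : List Int) (swap_times : Int) (original_lst : List Int) (out : Int) : Prop := out = get_num_combinations_alt lst swap_times original_lst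
instance (lst : List Int) (swap_times : Int) (original_lst : List Int) (out : Int) : Decidable (Spec_get_num_combinations lst swap_times original_lst out) := by unfold Spec_get_num_combinations; infer_instance

-- ===== CLAIM (what is proved, stated in full; the proofs are below) =====
def Claim_equal_get_num_combinations : Prop := ∀ (lst : List Int) (swap_times : Int) (original_lst : List Int), Dom_get_num_combinations lst swap_times original_lst → Pre_get_num_combinations lst swap_times original_lst → Spec_get_num_combinations lst swap_times original_lst (get_num_combinations lst swap_times original_lst)

-- ===== LEMMAS AND PROOFS =====

-- weighted sum of a function over a dict's entries
def sumV (d : PySem.Dict (List Int) Int) (f : List Int → Int) : Int :=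
  (d.items.map (fun p => p.2 * f p.1)).sum

theorem map_replace_of_not_mem (l : List (List Int × Int)) (m : List Int) (w : Int)
    (h : m ∉ l.map Prod.fst) :
    l.map (fun p => if p.1 == m then (m, w) else p) = l := by
  induction l with
  | nil => rfl
  | cons p t ih =>
      simp only [List.map_cons, List.mem_cons, not_or] at h ⊢
      rw [if_neg (by simp [Ne.symm h.1]), ih h.2]

theorem sum_replace (l : List (List Int × Int)) (m : List Int) (v w : Int) (f : List Int → Int)
    (hnd : (l.map Prod.fst).Nodup) (hmem : (m, v) ∈ l) :
    ((l.map (fun p => if p.1 == m then (m, w) else p)).map (fun p => p.2 * f p.1)).sum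
      = (l.map (fun p => p.2 * f p.1)).sum + (w - v) * f m := by
  induction l with
  | nil => cases hmem
  | cons p t ih =>
      simp only [List.map_cons, List.nodup_cons] at hnd
      simp only [List.map_cons, List.sum_cons]
      rcases List.mem_cons.mp hmem with h | h
      · rw [← h] at hnd ⊢
        rw [if_pos (by simp), map_replace_of_not_mem t m w hnd.1]
        ring
      · have hne : p.1 ≠ m := by
          intro he
          exact hnd.1 (he ▸ (List.mem_map.mpr ⟨(m, v), h, rfl⟩))
        rw [if_neg (by simp [hne])]
        rw [ih hnd.2 h]
        ring

theorem sumV_bump (d : PySem.Dict (List Int) Int) (m : List Int) (c : Int) (f : List Int → Int)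
    (h : d.keys.Nodup) :
    sumV (d.insert m (d.getD m 0 + c)) f = sumV d f + c * f m := by
  by_cases hc : d.contains m = true
  · obtain ⟨v, hv⟩ : ∃ v, d.get? m = some v := by
      rcases hg : d.get? m with _ | v
      · rw [PySem.Dict.contains_eq_isSome_get?, hg] at hc; simp at hc
      · exact ⟨v, rfl⟩
    have hgd : d.getD m 0 = v := PySem.Dict.getD_of_get?_eq_some d 0 hv
    have hmem : (m, v) ∈ d.items := PySem.Dict.mem_items_of_get?_eq_some d hv
    unfold sumV
    rw [PySem.Dict.items_insert_of_contains d _ hc, hgd,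
        sum_replace d.items m v (v + c) f h hmem]
    ring
  · unfold sumV
    rw [PySem.Dict.items_insert_of_not_contains d _ (by simpa using hc),
        PySem.Dict.getD_of_not_contains _ _ (by simpa using hc)]
    simp only [List.map_append, List.sum_append, List.map_cons, List.map_nil,
      List.sum_cons, List.sum_nil]
    ring

-- a fold whose every step adds a known amount to sumV and keeps keys nodup
theorem foldl_delta {α : Type} (g : PySem.Dict (List Int) Int → α → PySem.Dict (List Int) Int)
    (δ : α → Int) (f : List Int → Int)
    (hstep : ∀ d x, d.keys.Nodup → (g d x).keys.Nodup ∧ sumV (g d x) f = sumV d f + δ x) :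
    ∀ (l : List α) (d : PySem.Dict (List Int) Int), d.keys.Nodup →
      (l.foldl g d).keys.Nodup ∧ sumV (l.foldl g d) f = sumV d f + (l.map δ).sum := by
  intro l
  induction l with
  | nil => intro d hd; exact ⟨hd, by simp⟩
  | cons x t ih =>
      intro d hd
      obtain ⟨h1, h2⟩ := hstep d x hd
      obtain ⟨h3, h4⟩ := ih (g d x) h1
      refine ⟨h3, ?_⟩
      simp only [List.foldl_cons, List.map_cons, List.sum_cons] at *
      rw [h4, h2]; ring

theorem foldl_add_sum {α : Type} (h : α → Int) :
    ∀ (l : List α) (a0 : Int), l.foldl (fun a x => a + h x) a0 = a0 + (l.map h).sum := by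
  intro l
  induction l with
  | nil => intro a0; simp
  | cons x t ih => intro a0; simp [ih]; ring

theorem gncA_succ (lst : List Int) (k : Nat) (orig : List Int) :
    gncA lst (Nat.succ k) orig
      = ((List.range lst.length).map (fun i =>
          (((List.range lst.length).drop (i+1)).map
            (fun j => gncA (pySwap lst i j) k orig)).sum)).sum := by
  show (List.range lst.length).foldl _ 0 = _
  have : ∀ (l : List Nat) (a0 : Int),
      l.foldl (fun total i =>
        ((List.range lst.length).drop (i+1)).foldl
          (fun total j => total + gncA (pySwap lst i j) k orig) total) a0
      = a0 + (l.map (fun i =>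
          (((List.range lst.length).drop (i+1)).map
            (fun j => gncA (pySwap lst i j) k orig)).sum)).sum := by
    intro l
    induction l with
    | nil => intro a0; simp
    | cons x t ih => intro a0; simp [foldl_add_sum]; ring
  rw [this]; ring

theorem sum_map_mul_left' {α : Type} (c : Int) (f : α → Int) (l : List α) :
    (l.map (fun x => c * f x)).sum = c * (l.map f).sum := by
  induction l with
  | nil => simp
  | cons x t ih => simp [ih]; ring

-- one DP step turns the weight under gncA · k into the weight under gncA · (k+1)
theorem gncStep_sumV (d : PySem.Dict (List Int) Int) (k : Nat) (orig : List Int)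
    (hd : d.keys.Nodup) :
    (gncStep d).keys.Nodup ∧
      sumV (gncStep d) (fun m => gncA m k orig) = sumV d (fun m => gncA m (Nat.succ k) orig) := by
  have inner : ∀ (s : List Int) (c : Int) (i : Nat)
      (nxt : PySem.Dict (List Int) Int), nxt.keys.Nodup →
      ((((List.range s.length).drop (i+1)).foldl
          (fun nxt j => nxt.insert (pySwap s i j) (nxt.getD (pySwap s i j) 0 + c)) nxt)).keys.Nodup ∧
      sumV (((List.range s.length).drop (i+1)).foldl
          (fun nxt j => nxt.insert (pySwap s i j) (nxt.getD (pySwap s i j) 0 + c)) nxt)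
          (fun m => gncA m k orig)
        = sumV nxt (fun m => gncA m k orig)
          + (((List.range s.length).drop (i+1)).map
              (fun j => c * gncA (pySwap s i j) k orig)).sum := by
    intro s c i nxt hn
    exact foldl_delta _ (fun j => c * gncA (pySwap s i j) k orig) _
      (fun d' j hd' => ⟨PySem.Dict.nodup_keys_insert _ _ _ hd', sumV_bump d' _ c _ hd'⟩) _ nxt hn
  have middle : ∀ (s : List Int) (c : Int) (nxt : PySem.Dict (List Int) Int), nxt.keys.Nodup →
      ((List.range s.length).foldl
          (fun nxt i => ((List.range s.length).drop (i+1)).foldl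
            (fun nxt j => nxt.insert (pySwap s i j) (nxt.getD (pySwap s i j) 0 + c)) nxt) nxt).keys.Nodup ∧
      sumV ((List.range s.length).foldl
          (fun nxt i => ((List.range s.length).drop (i+1)).foldl
            (fun nxt j => nxt.insert (pySwap s i j) (nxt.getD (pySwap s i j) 0 + c)) nxt) nxt)
          (fun m => gncA m k orig)
        = sumV nxt (fun m => gncA m k orig) + c * gncA s (Nat.succ k) orig := by
    intro s c nxt hn
    have := foldl_delta _
      (fun i => (((List.range s.length).drop (i+1)).map
        (fun j => c * gncA (pySwap s i j) k orig)).sum) (fun m => gncA m k orig)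
      (fun d' i hd' => inner s c i d' hd') (List.range s.length) nxt hn
    refine ⟨this.1, ?_⟩
    rw [this.2, gncA_succ]
    congr 1
    rw [← sum_map_mul_left' c _ (List.range s.length)]
    congr 1
    exact List.map_congr_left (fun i _ => sum_map_mul_left' c _ _)
  have outer := foldl_delta _
    (fun p : List Int × Int => p.2 * gncA p.1 (Nat.succ k) orig) (fun m => gncA m k orig)
    (fun d' p hd' => middle p.1 p.2 d' hd') d.items PySem.Dict.empty
    PySem.Dict.nodup_keys_empty
  refine ⟨outer.1, ?_⟩
  show sumV (d.items.foldl _ PySem.Dict.empty) _ = _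
  rw [outer.2]
  unfold sumV
  simp [PySem.Dict.empty]

-- lookup of the target in a nodup dict equals the indicator-weighted sum
theorem sumV_indicator (d : PySem.Dict (List Int) Int) (orig : List Int) (h : d.keys.Nodup) :
    sumV d (fun m => if m = orig then (1 : Int) else 0) = d.getD orig 0 := by
  obtain ⟨l⟩ := d
  unfold sumV
  simp only [PySem.Dict.getD_eq_get?_getD]
  induction l with
  | nil => simp [PySem.Dict.get?]
  | cons p t ih =>
      simp only [PySem.Dict.keys] at h ih
      simp only [List.map_cons, List.nodup_cons] at h
      rw [PySem.Dict.get?_mk_cons]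
      by_cases hp : p.1 = orig
      · rw [if_pos (by simp [hp])]
        have : (PySem.Dict.mk t).get? orig = none := by
          rw [PySem.Dict.get?_eq_none_iff_not_mem_keys]
          · simpa [PySem.Dict.keys, hp] using h.1
        simp only [List.map_cons, List.sum_cons]
        have hz : (t.map (fun q => if q.1 = orig then q.2 else 0)).sum = 0 := by
          apply List.sum_eq_zero
          intro x hx
          obtain ⟨q, hq, rfl⟩ := List.mem_map.mp hx
          have : q.1 ≠ orig := by
            intro he; exact h.1 (hp ▸ he ▸ List.mem_map.mpr ⟨q, hq, rfl⟩)
          simp [this]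
        simp [hp, hz]
      · rw [if_neg (by simp [hp])]
        simp only [List.map_cons, List.sum_cons]
        rw [ih h.2]
        simp [hp]

-- the whole alt fold: answer after l.length steps
theorem alt_fold (orig : List Int) :
    ∀ (l : List Int) (d : PySem.Dict (List Int) Int), d.keys.Nodup →
      ((l.foldl (fun d _ => gncStep d) d)).getD orig 0
        = sumV d (fun m => gncA m l.length orig) := by
  intro l
  induction l with
  | nil =>
      intro d hd
      simpa using (sumV_indicator d orig hd).symm
  | cons x t ih =>
      intro d hd
      obtain ⟨h1, h2⟩ := gncStep_sumV d t.length orig hd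
      simp only [List.foldl_cons, List.length_cons]
      rw [ih (gncStep d) h1, h2]

theorem get_num_combinations_spec : Claim_equal_get_num_combinations := by
  intro lst swap_times orig _ hpre
  unfold Spec_get_num_combinations get_num_combinations get_num_combinations_alt
  have hnd : (PySem.Dict.empty.insert lst (1 : Int)).keys.Nodup :=
    PySem.Dict.nodup_keys_insert _ _ _ PySem.Dict.nodup_keys_empty
  rw [alt_fold orig _ _ hnd, PySem.List.length_pyRange_one]
  unfold sumV
  simp [PySem.Dict.items_insert_of_not_contains, PySem.Dict.empty]
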